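-- pv_equiv track=rewrite | github.com/jnheo1216/TIL | algorithm/1289_원재의메모리복구/s1.py | memory_recovery
-- ===== SOURCE A (Python) =====
-- def memory_recovery(memory_list):
--     zero_list = ['0'] * len(memory_list)
--     count = 0
--
--     for i in range(len(memory_list)):
--         if zero_list[i] != memory_list[i]:
--             for j in range(i, len(memory_list)):
--                 zero_list[j] = memory_list[i]
--             count += 1
--
--     return count
-- ===== SOURCE B (Python) =====
-- def memory_recovery(memory_list):
--     count = 0
--     prev = '0'
--     for ch in memory_list:
--         if ch != prev:
--             count += 1
--             prev = ch
--     return count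
-- ===== Notes on version B (the rewrite author's own statement) =====
-- stated objective: faster
-- what changed: Replaces the quadratic rewrite-the-suffix simulation with a single pass counting positions whose character differs from the previous character (starting from '0'), with no auxiliary list.
import Mathlib
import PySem

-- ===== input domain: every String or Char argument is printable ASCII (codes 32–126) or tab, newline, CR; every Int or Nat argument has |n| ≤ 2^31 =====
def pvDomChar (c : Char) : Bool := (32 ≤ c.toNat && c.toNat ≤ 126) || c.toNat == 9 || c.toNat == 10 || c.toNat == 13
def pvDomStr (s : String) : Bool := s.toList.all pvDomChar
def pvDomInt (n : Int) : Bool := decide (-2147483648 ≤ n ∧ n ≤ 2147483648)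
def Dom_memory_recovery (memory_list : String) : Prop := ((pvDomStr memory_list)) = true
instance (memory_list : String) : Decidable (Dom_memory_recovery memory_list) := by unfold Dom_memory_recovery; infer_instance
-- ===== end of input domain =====

-- B: one pass counting positions whose character differs from the previous one (starting from '0'),
-- replacing A's simulation that rewrites the whole suffix of an auxiliary list at each change; objective: faster.

-- ===== PORT A =====
-- inner loop of A: `for j in range(i, len(memory_list)): zero_list[j] = c`
def pvAFill (z : List Char) (j : Nat) (c : Char) : List Char :=
  if j < z.length then pvAFill (z.set j c) (j + 1) c else z
termination_by z.length - j
decreasing_by simp_all; omega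

-- outer loop of A over index i, carrying the mutable zero_list and count
def pvALoop (mem : List Char) (z : List Char) (i : Nat) (count : Int) : Int :=
  if i < mem.length then
    if z.getD i '0' ≠ mem.getD i '0' then
      pvALoop mem (pvAFill z i (mem.getD i '0')) (i + 1) (count + 1)
    else
      pvALoop mem z (i + 1) count
  else count
termination_by mem.length - i
decreasing_by all_goals omega

def memory_recovery (memory_list : String) : Int :=
  pvALoop memory_list.toList (List.replicate memory_list.toList.length '0') 0 0

-- ===== PORT B =====
def pvBLoop (cs : List Char) (prev : Char) (count : Int) : Int :=
  match cs with
  | [] => count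
  | c :: rest => if c ≠ prev then pvBLoop rest c (count + 1) else pvBLoop rest prev count

def memory_recovery_alt (memory_list : String) : Int :=
  pvBLoop memory_list.toList '0' 0

-- ===== PRECONDITION & SPEC =====
def Spec_memory_recovery (memory_list : String) (out : Int) : Prop := out = memory_recovery_alt memory_list
instance (memory_list : String) (out : Int) : Decidable (Spec_memory_recovery memory_list out) := by unfold Spec_memory_recovery; infer_instance

-- ===== CLAIM (what is proved, stated in full; the proofs are below) =====
def Claim_equal_memory_recovery : Prop := ∀ (memory_list : String), Dom_memory_recovery memory_list → Spec_memory_recovery memory_list (memory_recovery memory_list)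

-- ===== LEMMAS AND PROOFS =====

theorem pvSetPast (l : List Char) (j : Nat) (c : Char) (h : l.length ≤ j) : l.set j c = l := by
  induction l generalizing j with
  | nil => rfl
  | cons a t ih =>
    cases j with
    | zero => simp at h
    | succ j => simp [List.set, ih j (by simpa using h)]

-- filling from j onwards yields `take j` followed by a constant block
theorem pvAFill_eq (z : List Char) (j : Nat) (c : Char) :
    pvAFill z j c = z.take j ++ List.replicate (z.length - j) c := by
  by_cases h : j < z.length
  · rw [pvAFill, if_pos h, pvAFill_eq (z.set j c) (j + 1) c]
    have h1 : (z.set j c).take (j + 1) = z.take j ++ [c] := by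
      rw [List.take_add_one, List.take_set, pvSetPast _ _ _ (by simp)]
      simp [h]
    rw [h1, List.length_set]
    have h2 : z.length - j = (z.length - (j + 1)) + 1 := by omega
    rw [h2, List.replicate_succ, List.append_assoc]
    rfl
  · rw [pvAFill, if_neg h]
    have h2 : z.length - j = 0 := by omega
    simp [h2, List.take_of_length_le (by omega : z.length ≤ j)]
termination_by z.length - j
decreasing_by simp_all; omega

-- invariant: from index i = w.length on, zero_list is `w ++ replicate (n-i) prev`,
-- and A's remaining work equals B's scan of the remaining characters with state prev
theorem pvALoop_eq (mem : List Char) (k : Nat) (w : List Char) (prev : Char) (count : Int)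
    (hk : k = mem.length - w.length) (hle : w.length ≤ mem.length) :
    pvALoop mem (w ++ List.replicate k prev) w.length count
      = pvBLoop (mem.drop w.length) prev count := by
  induction k generalizing w prev count with
  | zero =>
    rw [pvALoop, if_neg (by omega)]
    rw [List.drop_of_length_le (by omega)]
    rfl
  | succ k ih =>
    have hi : w.length < mem.length := by omega
    have hz : (w ++ List.replicate (k + 1) prev).getD w.length '0' = prev := by
      simp [List.getD]
    have hm : mem.getD w.length '0' = mem[w.length] := List.getD_eq_getElem mem '0' hi
    have hdrop : mem.drop w.length = mem[w.length] :: mem.drop (w.length + 1) :=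
      List.drop_eq_getElem_cons hi
    rw [pvALoop, if_pos hi, hz, hm, hdrop, pvBLoop]
    by_cases hne : mem[w.length] ≠ prev
    · rw [if_pos (fun h => hne h.symm), if_pos hne]
      have hfill : pvAFill (w ++ List.replicate (k + 1) prev) w.length mem[w.length]
          = (w ++ [mem[w.length]]) ++ List.replicate k mem[w.length] := by
        rw [pvAFill_eq]
        simp [List.replicate_succ]
      rw [hfill]
      have := ih (w ++ [mem[w.length]]) mem[w.length] (count + 1)
        (by simp; omega) (by simp; omega)
      simpa using this
    · rw [not_not] at hne
      rw [if_neg (by simp [hne]), if_neg (by simp [hne])]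
      have hw : w ++ List.replicate (k + 1) prev = (w ++ [prev]) ++ List.replicate k prev := by
        simp [List.replicate_succ]
      rw [hw]
      have := ih (w ++ [prev]) prev count (by simp; omega) (by simp; omega)
      simpa [hne] using this

-- ===== VERDICT (by name: the statement is the Claim_ definition above) =====
theorem memory_recovery_spec : Claim_equal_memory_recovery := by
  intro s _
  unfold Spec_memory_recovery memory_recovery memory_recovery_alt
  have := pvALoop_eq s.toList s.toList.length [] '0' 0 (by simp) (by simp)
  simpa using this
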